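-- pv_equiv track=rewrite | github.com/Jwilson1172/NaiveBayes | naivebayes.py | separate_by_class
-- ===== SOURCE A (Python) =====
-- def separate_by_class(dataset: list) -> dict:
--     """Split the dataset by class values, returns a dictionary
--
--     """
--     separated = dict()
--     for i in range(len(dataset)):
--         vector = dataset[i]
--         class_value = vector[-1]
--         if (class_value not in separated):
--             separated[class_value] = list()
--         separated[class_value].append(vector)
--     return separated
-- ===== SOURCE B (Python) =====
-- def separate_by_class(dataset: list) -> dict:
--     """Split the dataset by class values, returns a dictionary
--
--     Two-pass re-implementation: first collect the distinct class labels in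
--     first-occurrence order, then build each group with a filter over the
--     dataset (rows keep their original relative order).
--     """
--     keys = []
--     for vector in dataset:
--         cv = vector[-1]
--         if cv not in keys:
--             keys.append(cv)
--     return {k: [v for v in dataset if v[-1] == k] for k in keys}
-- ===== Notes on version B (the rewrite author's own statement) =====
-- stated objective: alternative
-- what changed: Replaces A's single pass that mutates per-key lists inside a dict with a two-pass strategy: an ordered scan collecting the distinct class labels, then one filter of the dataset per label to build each group.
import Mathlib
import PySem

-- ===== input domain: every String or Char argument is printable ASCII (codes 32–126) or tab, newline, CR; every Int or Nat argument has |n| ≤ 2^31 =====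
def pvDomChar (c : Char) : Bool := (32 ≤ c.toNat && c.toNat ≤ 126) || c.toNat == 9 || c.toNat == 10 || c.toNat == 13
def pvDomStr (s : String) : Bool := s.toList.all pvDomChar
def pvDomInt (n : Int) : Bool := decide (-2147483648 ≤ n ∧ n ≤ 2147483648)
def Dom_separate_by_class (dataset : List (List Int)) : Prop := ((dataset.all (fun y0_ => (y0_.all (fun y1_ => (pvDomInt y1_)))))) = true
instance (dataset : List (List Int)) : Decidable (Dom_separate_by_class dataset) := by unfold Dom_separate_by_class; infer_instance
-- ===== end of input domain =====

-- B groups by collecting the distinct class labels first and then filtering the dataset once per label,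
-- instead of A's single pass appending into a dict of lists (objective: alternative decomposition).

-- ===== PORT A =====
-- vector[-1]; Pre_ excludes the empty rows on which Python raises IndexError (pyGet? = none there)
def pvKey (v : List Int) : Int := (PySem.List.pyGet? v (-1)).getD 0

def separate_by_class (dataset : List (List Int)) : List (Int × List (List Int)) :=
  ((PySem.List.pyRange 0 (dataset.length : Int) 1).foldl
    (fun (separated : PySem.Dict Int (List (List Int))) i =>
      let vector := PySem.List.pyGetD dataset i []
      let class_value := pvKey vector
      let separated := if separated.contains class_value then separated
                       else separated.insert class_value []
      separated.modify class_value [] (fun l => l ++ [vector]))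
    PySem.Dict.empty).items

-- ===== PORT B =====
def separate_by_class_alt (dataset : List (List Int)) : List (Int × List (List Int)) :=
  let keys := dataset.foldl (fun ks v => PySem.Set.add ks (pvKey v)) ([] : List Int)
  keys.map (fun k => (k, dataset.filter (fun v => pvKey v == k)))

-- ===== PRECONDITION & SPEC =====
-- Pre_ excludes exactly the datasets containing an empty row: there vector[-1] raises IndexError in A (and in B).
def Pre_separate_by_class (dataset : List (List Int)) : Prop := ∀ v ∈ dataset, v ≠ []
instance (dataset : List (List Int)) : Decidable (Pre_separate_by_class dataset) := by unfold Pre_separate_by_class; infer_instance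
def pvWitness_separate_by_class : List (List Int) := [[1, 0], [2, 1], [3, 0]]

def Spec_separate_by_class (dataset : List (List Int)) (out : List (Int × List (List Int))) : Prop := out = separate_by_class_alt dataset
instance (dataset : List (List Int)) (out : List (Int × List (List Int))) : Decidable (Spec_separate_by_class dataset out) := by unfold Spec_separate_by_class; infer_instance

-- ===== CLAIM (what is proved, stated in full; the proofs are below) =====
def Claim_equal_separate_by_class : Prop := ∀ (dataset : List (List Int)), Dom_separate_by_class dataset → Pre_separate_by_class dataset → Spec_separate_by_class dataset (separate_by_class dataset)

-- ===== LEMMAS AND PROOFS =====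

-- A's per-row step (helper for the proofs only; definitionally A's loop body)
def pvStepA (d : PySem.Dict Int (List (List Int))) (v : List Int) : PySem.Dict Int (List (List Int)) :=
  let class_value := pvKey v
  let d' := if d.contains class_value then d else d.insert class_value []
  d'.modify class_value [] (fun l => l ++ [v])

lemma pv_insert_modify (d : PySem.Dict Int (List (List Int))) (k : Int)
    (h : d.contains k = false) (f : List (List Int) → List (List Int)) :
    (d.insert k []).modify k [] f = d.modify k [] f := by
  have hx : ∀ p ∈ d.items, (p.1 == k) = false := by
    intro p hp
    have := h
    simp only [PySem.Dict.contains, List.any_eq_false] at this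
    simpa using this p hp
  have hg : d.getD k [] = [] := PySem.Dict.getD_of_not_contains d [] h
  simp only [PySem.Dict.modify, PySem.Dict.insert, PySem.Dict.contains] at *
  simp [h, List.any_append, List.map_append, hg]
  have hins : d.insert k [] = PySem.Dict.mk (d.items ++ [(k, [])]) := by
    apply PySem.Dict.ext
    show (d.insert k []).items = d.items ++ [(k, [])]
    exact PySem.Dict.items_insert_of_not_contains d [] h
  have hgi : (PySem.Dict.mk (d.items ++ [(k, [])]) : PySem.Dict Int (List (List Int))).getD k [] = [] := by
    rw [← hins, PySem.Dict.getD_insert_self]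
  rw [hgi]
  refine ⟨?_, rfl⟩
  have hid : ∀ p ∈ d.items, (fun p : Int × List (List Int) => if p.1 = k then (k, f []) else p) p = id p := by
    intro p hp
    simp [show p.1 ≠ k by simpa using hx p hp]
  rw [List.map_congr_left hid, List.map_id]

lemma pvStepA_eq (d : PySem.Dict Int (List (List Int))) (v : List Int) :
    pvStepA d v = d.modify (pvKey v) [] (fun l => l ++ [v]) := by
  unfold pvStepA
  by_cases h : d.contains (pvKey v) = true
  · simp [h]
  · simp only [Bool.not_eq_true] at h
    simp [h, pv_insert_modify d _ h]

lemma pv_foldl_stepA (rest : List (List Int)) (d : PySem.Dict Int (List (List Int))) :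
    rest.foldl pvStepA d = rest.foldl (fun d v => d.modify (pvKey v) [] (fun l => l ++ [v])) d := by
  induction rest generalizing d with
  | nil => rfl
  | cons x xs ih => simp [List.foldl_cons, pvStepA_eq, ih]

lemma pv_foldl_pairs (ds : List (List Int)) (d : PySem.Dict Int (List (List Int))) :
    ds.foldl (fun d v => d.modify (pvKey v) [] (fun l => l ++ [v])) d
      = (ds.map (fun v => (pvKey v, v))).foldl (fun d p => d.modify p.1 [] (fun l => l ++ [p.2])) d := by
  induction ds generalizing d with
  | nil => rfl
  | cons x xs ih => simp [List.foldl_cons, ih]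

-- ===== VERDICT (by name: the statement is the Claim_ definition above) =====
theorem separate_by_class_spec : Claim_equal_separate_by_class := by
  intro ds _ _
  unfold Spec_separate_by_class separate_by_class separate_by_class_alt
  rw [show (fun (separated : PySem.Dict Int (List (List Int))) (i : Int) =>
        let vector := PySem.List.pyGetD ds i []
        let class_value := pvKey vector
        let separated := if separated.contains class_value then separated
                         else separated.insert class_value []
        separated.modify class_value [] (fun l => l ++ [vector]))
      = (fun acc i => pvStepA acc (PySem.List.pyGetD ds i [])) from rfl]
  rw [PySem.List.foldl_pyRange_zero_pyGetD' ds [] pvStepA PySem.Dict.empty]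
  rw [pv_foldl_stepA]
  set D := ds.foldl (fun d v => d.modify (pvKey v) [] (fun l => l ++ [v])) PySem.Dict.empty with hD
  have hnd : D.keys.Nodup := by
    rw [hD]
    exact PySem.Dict.nodup_keys_foldl_modify_key ds pvKey [] (fun d v => fun l => l ++ [v]) PySem.Dict.empty (by simp)
  have hkeys : D.keys = ds.foldl (fun ks v => PySem.Set.add ks (pvKey v)) ([] : List Int) := by
    rw [hD, PySem.Dict.keys_foldl_modify_key]
    simp [PySem.Set.update_nil_left, ← PySem.Set.update_map_eq_foldl_add]
  have hget : ∀ c, D.getD c [] = ds.filter (fun v => pvKey v == c) := by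
    intro c
    rw [hD]
    rw [pv_foldl_pairs]
    rw [PySem.Dict.getD_foldl_modify_append]
    simp [List.filter_map, Function.comp_def]
  rw [PySem.Dict.items_eq_map_keys D hnd []]
  rw [hkeys]
  exact List.map_congr_left (fun k _ => by rw [hget k])
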